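-- pv_equiv track=rewrite | github.com/sepal/code-challanges | 01-add-operators/python/solution.py | backtrack
-- ===== SOURCE A (Python) =====
-- def backtrack(last_val: int, i: int, source: list[int], target: str, expression: str, result: [str]):
--     if i == len(source):
--         if last_val == target:
--             result.append(expression)
--             return result
--         return result
--
--     backtrack(last_val * source[i],  i+1, source, target,
--               f'{expression}*{source[i]}', result)
--     backtrack(last_val + source[i],  i+1, source, target,
--               f'{expression}+{source[i]}', result)
--     backtrack(last_val - source[i],  i+1, source, target,
--               f'({expression}-{source[i]})', result)
--     return result
-- ===== SOURCE B (Python) =====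
-- def backtrack(last_val: int, i: int, source: list[int], target: str, expression: str, result: [str]):
--     # Breadth-first: expand every partial (value, expression) state level by level,
--     # then append the matching expressions to result (mutated in place, like A).
--     states = [(last_val, expression)]
--     for j in range(i, len(source)):
--         x = source[j]
--         states = [nxt
--                   for v, e in states
--                   for nxt in ((v * x, f'{e}*{x}'),
--                               (v + x, f'{e}+{x}'),
--                               (v - x, f'({e}-{x})'))]
--     for v, e in states:
--         if v == target:
--             result.append(e)
--     return result
-- ===== Notes on version B (the rewrite author's own statement) =====
-- stated objective: alternative
-- what changed: Replaces A's depth-first recursion (three recursive calls per element, threading the shared result list) with an iterative breadth-first enumeration that expands a list of all partial (value, expression) states level by level over source[i:] and then appends the matching expressions.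
import Mathlib
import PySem

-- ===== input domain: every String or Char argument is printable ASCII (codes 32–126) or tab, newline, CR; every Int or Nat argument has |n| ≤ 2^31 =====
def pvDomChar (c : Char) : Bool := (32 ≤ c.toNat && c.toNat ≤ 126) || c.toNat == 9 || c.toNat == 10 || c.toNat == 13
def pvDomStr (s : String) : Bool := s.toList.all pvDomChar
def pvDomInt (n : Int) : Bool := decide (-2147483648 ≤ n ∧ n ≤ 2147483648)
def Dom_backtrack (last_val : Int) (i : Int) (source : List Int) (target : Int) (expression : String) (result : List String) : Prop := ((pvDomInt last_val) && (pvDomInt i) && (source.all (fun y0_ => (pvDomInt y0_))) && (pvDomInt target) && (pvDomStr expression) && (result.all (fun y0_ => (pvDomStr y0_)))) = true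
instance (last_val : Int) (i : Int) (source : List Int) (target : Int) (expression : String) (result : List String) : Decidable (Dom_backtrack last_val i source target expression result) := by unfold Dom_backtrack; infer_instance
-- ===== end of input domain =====

-- B replaces A's depth-first recursion by a breadth-first level-by-level expansion of all
-- partial (value, expression) states; equivalence is about the return value, and both
-- implementations also append the matching expressions to the passed-in result list.

-- ===== PORT A =====
def backtrack (last_val : Int) (i : Int) (source : List Int) (target : Int) (expression : String) (result : List String) : List String :=
  if i = (source.length : Int) then
    if last_val = target then result ++ [expression] else result
  else
    match hx : PySem.List.pyGet? source i with
    | none => result  -- Python raises IndexError here (excluded by Pre_backtrack)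
    | some x =>
      let r1 := backtrack (last_val * x) (i + 1) source target
                  (expression ++ "*" ++ PySem.Int.toStr x) result
      let r2 := backtrack (last_val + x) (i + 1) source target
                  (expression ++ "+" ++ PySem.Int.toStr x) r1
      backtrack (last_val - x) (i + 1) source target
        ("(" ++ expression ++ "-" ++ PySem.Int.toStr x ++ ")") r2
termination_by (source.length - i).toNat
decreasing_by
  all_goals
    · have hin : PySem.Raise.InRange source.length i := by
        by_contra hcon
        rw [← PySem.List.pyGet?_eq_none_iff] at hcon
        simp [hx] at hcon
      obtain ⟨_, h2⟩ := hin
      omega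

-- ===== PORT B =====
-- one expansion step: every state gets its three children, in the order *, +, -
def pvExpand (x : Int) (states : List (Int × String)) : List (Int × String) :=
  states.flatMap (fun s =>
    [(s.1 * x, s.2 ++ "*" ++ PySem.Int.toStr x),
     (s.1 + x, s.2 ++ "+" ++ PySem.Int.toStr x),
     (s.1 - x, "(" ++ s.2 ++ "-" ++ PySem.Int.toStr x ++ ")")])

def backtrack_alt (last_val : Int) (i : Int) (source : List Int) (target : Int) (expression : String) (result : List String) : List String :=
  let states := (PySem.List.pyRange i (source.length : Int) 1).foldl
      (fun st j => pvExpand (PySem.List.pyGetD source j 0) st) [(last_val, expression)]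
  states.foldl (fun res s => if s.1 = target then res ++ [s.2] else res) result

-- ===== PRECONDITION & SPEC =====
-- Pre_ excludes exactly the indices i on which A raises IndexError (i > len(source) or i < -len(source)).
def Pre_backtrack (last_val : Int) (i : Int) (source : List Int) (target : Int) (expression : String) (result : List String) : Prop :=
  -(source.length : Int) ≤ i ∧ i ≤ (source.length : Int)
instance (last_val : Int) (i : Int) (source : List Int) (target : Int) (expression : String) (result : List String) : Decidable (Pre_backtrack last_val i source target expression result) := by unfold Pre_backtrack; infer_instance

def pvWitness_backtrack : Int × Int × List Int × Int × String × List String := (1, 0, [2, 3], 5, "1", [])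

def Spec_backtrack (last_val : Int) (i : Int) (source : List Int) (target : Int) (expression : String) (result : List String) (out : List String) : Prop := out = backtrack_alt last_val i source target expression result
instance (last_val : Int) (i : Int) (source : List Int) (target : Int) (expression : String) (result : List String) (out : List String) : Decidable (Spec_backtrack last_val i source target expression result out) := by unfold Spec_backtrack; infer_instance

-- ===== CLAIM (what is proved, stated in full; the proofs are below) =====
def Claim_equal_backtrack : Prop := ∀ (last_val : Int) (i : Int) (source : List Int) (target : Int) (expression : String) (result : List String), Dom_backtrack last_val i source target expression result → Pre_backtrack last_val i source target expression result → Spec_backtrack last_val i source target expression result (backtrack last_val i source target expression result)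

-- ===== LEMMAS AND PROOFS =====

-- the values A/B read from source, from index i onwards (with Python's negative indexing)
def pvVals (source : List Int) (i : Int) : List Int :=
  (PySem.List.pyRange i (source.length : Int) 1).map (fun j => PySem.List.pyGetD source j 0)

-- the expressions collected from a batch of start states over a value list
def pvCollect (t : Int) (xs : List Int) (states : List (Int × String)) : List String :=
  ((xs.foldl (fun st x => pvExpand x st) states).filter (fun s => s.1 = t)).map (fun s => s.2)

theorem pvVals_nil (source : List Int) (i : Int) (h : (source.length : Int) ≤ i) :
    pvVals source i = [] := by
  simp [pvVals, PySem.List.pyRange_one_eq_nil h]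

theorem pvVals_cons (source : List Int) (i : Int) (h : i < (source.length : Int)) :
    pvVals source i = PySem.List.pyGetD source i 0 :: pvVals source (i + 1) := by
  simp [pvVals, PySem.List.pyRange_one_cons h]

theorem pvExpand_append (x : Int) (as bs : List (Int × String)) :
    pvExpand x (as ++ bs) = pvExpand x as ++ pvExpand x bs := by
  simp [pvExpand]

theorem pvCollect_append (t : Int) (xs : List Int) (as bs : List (Int × String)) :
    pvCollect t xs (as ++ bs) = pvCollect t xs as ++ pvCollect t xs bs := by
  induction xs generalizing as bs with
  | nil => simp [pvCollect]
  | cons x xs ih =>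
      simp only [pvCollect, List.foldl_cons, pvExpand_append]
      exact ih (pvExpand x as) (pvExpand x bs)

theorem pvCollect_cons (t : Int) (x : Int) (xs : List Int) (v : Int) (e : String) :
    pvCollect t (x :: xs) [(v, e)]
      = pvCollect t xs [(v * x, e ++ "*" ++ PySem.Int.toStr x)]
        ++ pvCollect t xs [(v + x, e ++ "+" ++ PySem.Int.toStr x)]
        ++ pvCollect t xs [(v - x, "(" ++ e ++ "-" ++ PySem.Int.toStr x ++ ")")] := by
  have h : pvExpand x [(v, e)]
      = ([(v * x, e ++ "*" ++ PySem.Int.toStr x)]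
          ++ [(v + x, e ++ "+" ++ PySem.Int.toStr x)])
        ++ [(v - x, "(" ++ e ++ "-" ++ PySem.Int.toStr x ++ ")")] := by
    simp [pvExpand]
  have e1 := pvCollect_append t xs
    ([(v * x, e ++ "*" ++ PySem.Int.toStr x)] ++ [(v + x, e ++ "+" ++ PySem.Int.toStr x)])
    [(v - x, "(" ++ e ++ "-" ++ PySem.Int.toStr x ++ ")")]
  have e2 := pvCollect_append t xs
    [(v * x, e ++ "*" ++ PySem.Int.toStr x)] [(v + x, e ++ "+" ++ PySem.Int.toStr x)]
  simp only [pvCollect] at e1 e2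
  simp only [pvCollect, List.foldl_cons, h]
  rw [e1, e2]

theorem pvFold_filter (t : Int) (states : List (Int × String)) (res : List String) :
    states.foldl (fun res s => if s.1 = t then res ++ [s.2] else res) res
      = res ++ (states.filter (fun s => s.1 = t)).map (fun s => s.2) := by
  induction states generalizing res with
  | nil => simp
  | cons s states ih =>
      by_cases h : s.1 = t <;> simp [List.filter_cons, h, ih]

-- A equals result ++ collected expressions, by induction on the remaining length
theorem backtrack_eq_collect (source : List Int) (target : Int) :
    ∀ (n : Nat) (i last_val : Int) (expression : String) (result : List String),
      ((source.length : Int) - i).toNat = n →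
      -(source.length : Int) ≤ i → i ≤ (source.length : Int) →
      backtrack last_val i source target expression result
        = result ++ pvCollect target (pvVals source i) [(last_val, expression)] := by
  intro n
  induction n with
  | zero =>
      intro i last_val expression result hn h1 h2
      have hi : i = (source.length : Int) := by omega
      rw [backtrack, if_pos hi, pvVals_nil source i (by omega)]
      by_cases h : last_val = target <;> simp [pvCollect, h]
  | succ n ih =>
      intro i last_val expression result hn h1 h2
      have hi : i < (source.length : Int) := by omega
      have hne : ¬ i = (source.length : Int) := by omega
      have hin : PySem.Raise.InRange source.length i := ⟨h1, hi⟩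
      have hsome : ∃ x, PySem.List.pyGet? source i = some x := by
        rcases hget : PySem.List.pyGet? source i with _ | x
        · rw [PySem.List.pyGet?_eq_none_iff] at hget; exact absurd hin hget
        · exact ⟨x, rfl⟩
      obtain ⟨x, hx⟩ := hsome
      have hxd : PySem.List.pyGetD source i 0 = x := by
        simp [PySem.List.pyGetD, hx]
      rw [backtrack, if_neg hne]
      split
      case _ heq => rw [hx] at heq; exact absurd heq (by simp)
      case _ x' heq =>
      rw [hx] at heq
      injection heq with heq'
      subst heq'
      have hn' : ((source.length : Int) - (i + 1)).toNat = n := by omega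
      show backtrack (last_val - x) (i + 1) source target
            ("(" ++ expression ++ "-" ++ PySem.Int.toStr x ++ ")")
            (backtrack (last_val + x) (i + 1) source target
              (expression ++ "+" ++ PySem.Int.toStr x)
              (backtrack (last_val * x) (i + 1) source target
                (expression ++ "*" ++ PySem.Int.toStr x) result))
          = result ++ pvCollect target (pvVals source i) [(last_val, expression)]
      rw [ih (i + 1) (last_val * x) (expression ++ "*" ++ PySem.Int.toStr x) result hn' (by omega) (by omega)]
      rw [ih (i + 1) (last_val + x) (expression ++ "+" ++ PySem.Int.toStr x) _ hn' (by omega) (by omega)]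
      rw [ih (i + 1) (last_val - x) ("(" ++ expression ++ "-" ++ PySem.Int.toStr x ++ ")") _ hn' (by omega) (by omega)]
      rw [pvVals_cons source i hi, hxd, pvCollect_cons]
      simp [List.append_assoc]

theorem backtrack_alt_eq_collect (last_val i : Int) (source : List Int) (target : Int)
    (expression : String) (result : List String) :
    backtrack_alt last_val i source target expression result
      = result ++ pvCollect target (pvVals source i) [(last_val, expression)] := by
  unfold backtrack_alt pvCollect pvVals
  rw [List.foldl_map, pvFold_filter]

-- ===== VERDICT (by name: the statement is the Claim_ definition above) =====
theorem backtrack_spec : Claim_equal_backtrack := by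
  intro last_val i source target expression result _ hpre
  unfold Spec_backtrack
  rw [backtrack_eq_collect source target ((source.length : Int) - i).toNat i last_val expression result rfl hpre.1 hpre.2,
      backtrack_alt_eq_collect]
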